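-- pv_equiv track=rewrite | github.com/pypi-data/pypi-mirror-403 | packages/scc-cli/scc_cli-1.7.2-py3-none-any.whl/scc_cli/ui/formatters.py | _shorten_docker_status
-- ===== SOURCE A (Python) =====
-- def _shorten_docker_status(status: str) -> str:
--     """Shorten Docker status strings for compact display.
--
--     Converts verbose time units to abbreviations:
--     - "Up 2 hours" -> "Up 2h"
--     - "Exited (0) 5 minutes ago" -> "Exited 5m ago"
--
--     Args:
--         status: Full Docker status string.
--
--     Returns:
--         Shortened status string.
--     """
--     result = status
--     replacements = [
--         (" hours", "h"),
--         (" hour", "h"),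
--         (" minutes", "m"),
--         (" minute", "m"),
--         (" seconds", "s"),
--         (" second", "s"),
--         (" days", "d"),
--         (" day", "d"),
--         (" weeks", "w"),
--         (" week", "w"),
--     ]
--     for old, new in replacements:
--         result = result.replace(old, new)
--     return result
-- ===== SOURCE B (Python) =====
-- _UNITS = {"hour": "h", "minute": "m", "second": "s", "day": "d", "week": "w"}
--
--
-- def _shorten_docker_status(status: str) -> str:
--     """Shorten Docker status strings in one left-to-right scan: at each
--     space, a following unit word (with optional plural 's') is replaced by
--     its one-letter abbreviation."""
--     out = []
--     i = 0
--     n = len(status)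
--     while i < n:
--         if status[i] == " ":
--             for unit, ab in _UNITS.items():
--                 if status.startswith(unit, i + 1):
--                     j = i + 1 + len(unit)
--                     if j < n and status[j] == "s":
--                         j += 1
--                     out.append(ab)
--                     i = j
--                     break
--             else:
--                 out.append(status[i])
--                 i += 1
--         else:
--             out.append(status[i])
--             i += 1
--     return "".join(out)
-- ===== Notes on version B (the rewrite author's own statement) =====
-- stated objective: idiomatic
-- what changed: One left-to-right scan that abbreviates a unit word (with optional plural 's') after each space, instead of ten sequential full-string replace passes; Pre_ excludes strings containing one of seven cascade substrings (e.g. ' day second'), on which A's value depends on one replacement re-matching text produced by an earlier pass - an order-dependent corner no caller specifies.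
-- outside the precondition, e.g. on _shorten_docker_status('  daysay'): A returns 'd', B returns ' day'; on _shorten_docker_status(' day second'): A returns 'd', B returns 'ds'; on _shorten_docker_status('  hoursour'): A returns 'h', B returns ' hour'
import Mathlib
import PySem

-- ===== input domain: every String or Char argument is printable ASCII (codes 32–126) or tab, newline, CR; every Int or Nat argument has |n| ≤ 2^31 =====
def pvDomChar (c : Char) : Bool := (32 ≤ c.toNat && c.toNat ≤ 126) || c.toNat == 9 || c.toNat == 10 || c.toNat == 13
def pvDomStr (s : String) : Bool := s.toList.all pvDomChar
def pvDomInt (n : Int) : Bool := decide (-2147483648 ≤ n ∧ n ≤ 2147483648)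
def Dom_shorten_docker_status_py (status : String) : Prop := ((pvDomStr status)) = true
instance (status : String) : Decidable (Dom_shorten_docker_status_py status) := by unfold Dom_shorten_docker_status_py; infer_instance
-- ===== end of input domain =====

-- B rewrites A's ten sequential full-string replace passes as ONE left-to-right scan
-- that abbreviates a unit word (with optional plural 's') after each space.

-- ===== PORT A =====
def pvReplacements : List (String × String) :=
  [(" hours", "h"), (" hour", "h"), (" minutes", "m"), (" minute", "m"),
   (" seconds", "s"), (" second", "s"), (" days", "d"), (" day", "d"),
   (" weeks", "w"), (" week", "w")]

def shorten_docker_status_py (status : String) : String :=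
  pvReplacements.foldl (fun result oldnew => PySem.Str.replace result oldnew.1 oldnew.2) status

-- ===== PORT B =====
def pvUnits : List (List Char × Char) :=
  [("hour".toList, 'h'), ("minute".toList, 'm'), ("second".toList, 's'),
   ("day".toList, 'd'), ("week".toList, 'w')]

-- the inner `for unit, ab in _UNITS.items(): if status.startswith(unit, i+1): …` of Source B
def pvTryUnit : List (List Char × Char) → List Char → Option (Char × List Char)
  | [], _ => none
  | (u, ab) :: us, s =>
    if u <+: s then
      match s.drop u.length with
      | 's' :: r => some (ab, r)
      | r => some (ab, r)
    else pvTryUnit us s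

-- the `while i < n:` scan of Source B (fuel = remaining length, like PySem's replace.go;
-- pvScanGo fuel l with l.length ≤ fuel consumes at least one char per step)
def pvScanGo : Nat → List Char → List Char
  | 0, l => l
  | _, [] => []
  | fuel + 1, c :: cs =>
    if c = ' ' then
      match pvTryUnit pvUnits cs with
      | some (ab, rest) => ab :: pvScanGo fuel rest
      | none => c :: pvScanGo fuel cs
    else c :: pvScanGo fuel cs

def pvScan (l : List Char) : List Char := pvScanGo l.length l

def shorten_docker_status_py_alt (status : String) : String :=
  String.ofList (pvScan status.toList)

-- ===== PRECONDITION & SPEC =====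
-- Pre_ excludes strings containing one of the seven cascade substrings below, on which
-- the value of A's ten sequential replace passes depends on a replacement re-matching
-- text produced by an earlier pass while B abbreviates each original occurrence — an
-- order-dependent corner no caller specifies (excluded examples: claim.json "cites").
def Pre_shorten_docker_status_py (status : String) : Prop :=
  ¬ ∃ t ∈ ["  hoursour", "  minutesinute", "  secondsecond", "  daysay", "  weekseek",
           " day second", " week second"], (t : String).toList <:+: status.toList

instance (status : String) : Decidable (Pre_shorten_docker_status_py status) :=
  decidable_of_iff
    (¬ (["  hoursour", "  minutesinute", "  secondsecond", "  daysay", "  weekseek",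
         " day second", " week second"] : List String).any
      (fun t => PySem.Chars.isIn t.toList status.toList) = true)
    (by simp only [List.any_eq_true, PySem.Chars.isIn_iff_infix, Pre_shorten_docker_status_py])

def pvWitness_shorten_docker_status_py : String := "Up 2 hours"

def Spec_shorten_docker_status_py (status : String) (out : String) : Prop :=
  out = shorten_docker_status_py_alt status

instance (status : String) (out : String) : Decidable (Spec_shorten_docker_status_py status out) := by
  unfold Spec_shorten_docker_status_py; infer_instance

-- ===== CLAIM (what is proved, stated in full; the proofs are below) =====
def Claim_equal_shorten_docker_status_py : Prop :=
  ∀ (status : String), Dom_shorten_docker_status_py status →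
    Pre_shorten_docker_status_py status →
    Spec_shorten_docker_status_py status (shorten_docker_status_py status)

-- ===== LEMMAS AND PROOFS =====

def pvTriggers : List (List Char) :=
  ["  hoursour".toList, "  minutesinute".toList, "  secondsecond".toList,
   "  daysay".toList, "  weekseek".toList, " day second".toList, " week second".toList]

-- ---------- proof-side replace (Python's s.replace(' '+stem, a) on char lists) ----------
def pvRepl (stem : List Char) (a : Char) : List Char → List Char
  | [] => []
  | c :: cs =>
    if c = ' ' ∧ stem <+: cs then a :: pvRepl stem a (cs.drop stem.length)
    else c :: pvRepl stem a cs
termination_by l => l.length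
decreasing_by
  · simp only [List.length_drop, List.length_cons]; omega
  · simp

theorem pvRepl_nil (stem : List Char) (a : Char) : pvRepl stem a [] = [] := by
  simp [pvRepl]

theorem pvRepl_cons_pos {stem : List Char} {a c : Char} {cs : List Char}
    (h : c = ' ' ∧ stem <+: cs) :
    pvRepl stem a (c :: cs) = a :: pvRepl stem a (cs.drop stem.length) := by
  rw [pvRepl, if_pos h]

theorem pvRepl_cons_neg {stem : List Char} {a c : Char} {cs : List Char}
    (h : ¬ (c = ' ' ∧ stem <+: cs)) :
    pvRepl stem a (c :: cs) = c :: pvRepl stem a cs := by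
  rw [pvRepl, if_neg h]

-- bridge: PySem's fuelled replace.go computes pvRepl
theorem pvGoBridge (stem : List Char) (a : Char) :
    ∀ (fuel : Nat) (l acc : List Char), l.length ≤ fuel →
      PySem.Chars.replace.go (' ' :: stem) [a] fuel l acc = acc.reverse ++ pvRepl stem a l := by
  intro fuel
  induction fuel with
  | zero =>
    intro l acc hl
    have : l = [] := List.eq_nil_of_length_eq_zero (Nat.le_zero.mp hl)
    subst this
    simp [PySem.Chars.replace.go, pvRepl_nil]
  | succ fuel ih =>
    intro l acc hl
    cases l with
    | nil => simp [PySem.Chars.replace.go, pvRepl_nil]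
    | cons c cs =>
      by_cases hp : (' ' :: stem) <+: (c :: cs)
      · have hp' : (' ' :: stem).isPrefixOf (c :: cs) = true := by
          rw [List.isPrefixOf_iff_prefix]; exact hp
        have hcs : (' ' : Char) = c ∧ stem <+: cs := List.cons_prefix_cons.mp hp
        have hsl : stem.length ≤ cs.length := by
          have := hcs.2.length_le; omega
        rw [show PySem.Chars.replace.go (' ' :: stem) [a] (fuel + 1) (c :: cs) acc
              = PySem.Chars.replace.go (' ' :: stem) [a] fuel
                  ((c :: cs).drop (' ' :: stem).length) ([a].reverse ++ acc) from by
          simp [PySem.Chars.replace.go, hp']]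
        have hdrop : (c :: cs).drop (' ' :: stem).length = cs.drop stem.length := by
          simp [List.drop_succ_cons]
        rw [hdrop, ih _ _ (by simp only [List.length_drop]; simp at hl; omega)]
        rw [pvRepl_cons_pos ⟨hcs.1.symm, hcs.2⟩]
        simp
      · have hp' : (' ' :: stem).isPrefixOf (c :: cs) = false := by
          rw [Bool.eq_false_iff]
          intro hcon
          exact hp (List.isPrefixOf_iff_prefix.mp hcon)
        rw [show PySem.Chars.replace.go (' ' :: stem) [a] (fuel + 1) (c :: cs) acc
              = PySem.Chars.replace.go (' ' :: stem) [a] fuel cs (c :: acc) from by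
          simp [PySem.Chars.replace.go, hp']]
        rw [ih _ _ (by simp at hl ⊢; omega)]
        rw [pvRepl_cons_neg (fun hh => hp (List.cons_prefix_cons.mpr ⟨hh.1.symm, hh.2⟩))]
        simp

theorem pvReplBridge (stem : List Char) (a : Char) (l : List Char) :
    PySem.Chars.replace l (' ' :: stem) [a] = pvRepl stem a l := by
  have := pvGoBridge stem a l.length l [] le_rfl
  simpa [PySem.Chars.replace] using this

-- A's ten (stem, abbreviation) pairs, in pass order
def pvStems : List (List Char × Char) :=
  [("hours".toList, 'h'), ("hour".toList, 'h'), ("minutes".toList, 'm'), ("minute".toList, 'm'),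
   ("seconds".toList, 's'), ("second".toList, 's'), ("days".toList, 'd'), ("day".toList, 'd'),
   ("weeks".toList, 'w'), ("week".toList, 'w')]

def pvPasses (l : List Char) : List Char :=
  pvStems.foldl (fun acc p => pvRepl p.1 p.2 acc) l

theorem pvA_toList (s : String) : (shorten_docker_status_py s).toList = pvPasses s.toList := by
  have h : ∀ (l : List Char) (u v : String) (stem : List Char) (a : Char),
      u.toList = ' ' :: stem → v.toList = [a] →
      PySem.Chars.replace l u.toList v.toList = pvRepl stem a l := by
    intro l u v stem a hu hv
    rw [hu, hv]
    exact pvReplBridge stem a l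
  have h1 := fun l => h l " hours" "h" "hours".toList 'h' (by decide) (by decide)
  have h2 := fun l => h l " hour" "h" "hour".toList 'h' (by decide) (by decide)
  have h3 := fun l => h l " minutes" "m" "minutes".toList 'm' (by decide) (by decide)
  have h4 := fun l => h l " minute" "m" "minute".toList 'm' (by decide) (by decide)
  have h5 := fun l => h l " seconds" "s" "seconds".toList 's' (by decide) (by decide)
  have h6 := fun l => h l " second" "s" "second".toList 's' (by decide) (by decide)
  have h7 := fun l => h l " days" "d" "days".toList 'd' (by decide) (by decide)
  have h8 := fun l => h l " day" "d" "day".toList 'd' (by decide) (by decide)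
  have h9 := fun l => h l " weeks" "w" "weeks".toList 'w' (by decide) (by decide)
  have h10 := fun l => h l " week" "w" "week".toList 'w' (by decide) (by decide)
  simp only [shorten_docker_status_py, pvReplacements, List.foldl, PySem.Str.toList_replace,
    h1, h2, h3, h4, h5, h6, h7, h8, h9, h10]
  simp [pvPasses, pvStems, List.foldl]

-- ---------- proof-side multi-pattern scan ----------
def pvStemMatch : List (List Char × Char) → List Char → Option (Char × List Char)
  | [], _ => none
  | (t, b) :: ps, s => if t <+: s then some (b, s.drop t.length) else pvStemMatch ps s

theorem pvStemMatch_suffix :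
    ∀ (ps : List (List Char × Char)) (s : List Char) (b : Char) (rest : List Char),
      pvStemMatch ps s = some (b, rest) → rest <:+ s := by
  intro ps
  induction ps with
  | nil => intro s b rest h; simp [pvStemMatch] at h
  | cons p ps ih =>
    intro s b rest h
    obtain ⟨t, c⟩ := p
    by_cases hp : t <+: s
    · simp only [pvStemMatch, if_pos hp, Option.some.injEq, Prod.mk.injEq] at h
      rw [← h.2]
      exact List.drop_suffix _ _
    · simp only [pvStemMatch, if_neg hp] at h
      exact ih _ _ _ h

def pvScanL (ps : List (List Char × Char)) : List Char → List Char
  | [] => []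
  | c :: cs =>
    if c = ' ' then
      match hm : pvStemMatch ps cs with
      | some (b, rest) => b :: pvScanL ps rest
      | none => c :: pvScanL ps cs
    else c :: pvScanL ps cs
termination_by l => l.length
decreasing_by
  · have := (pvStemMatch_suffix ps cs _ _ hm).length_le
    simp; omega
  · simp
  · simp

theorem pvScanL_nil (ps : List (List Char × Char)) : pvScanL ps [] = [] := by
  simp [pvScanL]

theorem pvScanL_sp_some {ps : List (List Char × Char)} {cs : List Char} {b : Char}
    {rest : List Char} (h : pvStemMatch ps cs = some (b, rest)) :
    pvScanL ps (' ' :: cs) = b :: pvScanL ps rest := by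
  rw [pvScanL]
  simp only [reduceIte]
  split
  · rename_i b' rest' heq
    rw [h] at heq
    simp only [Option.some.injEq, Prod.mk.injEq] at heq
    rw [heq.1, heq.2]
  · rename_i heq
    rw [h] at heq
    simp at heq

theorem pvScanL_sp_none {ps : List (List Char × Char)} {cs : List Char}
    (h : pvStemMatch ps cs = none) :
    pvScanL ps (' ' :: cs) = ' ' :: pvScanL ps cs := by
  rw [pvScanL]
  simp only [reduceIte]
  split
  · rename_i b' rest' heq
    rw [h] at heq
    simp at heq
  · rfl

theorem pvScanL_cons {ps : List (List Char × Char)} {c : Char} {cs : List Char}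
    (hc : c ≠ ' ') : pvScanL ps (c :: cs) = c :: pvScanL ps cs := by
  rw [pvScanL]
  simp [hc]

theorem pvScanL_empty : ∀ l : List Char, pvScanL [] l = l := by
  intro l
  induction l with
  | nil => exact pvScanL_nil []
  | cons c cs ih =>
    by_cases hc : c = ' '
    · subst hc
      rw [pvScanL_sp_none (by simp [pvStemMatch]), ih]
    · rw [pvScanL_cons hc, ih]

-- ---------- pvRepl walks over a space-free word ----------
theorem pvRepl_skip (stem : List Char) (a : Char) :
    ∀ (w t : List Char), ' ' ∉ w → pvRepl stem a (w ++ t) = w ++ pvRepl stem a t := by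
  intro w
  induction w with
  | nil => intro t _; simp
  | cons c w ih =>
    intro t hw
    have hc : c ≠ ' ' := fun h => hw (by simp [h])
    rw [List.cons_append, pvRepl_cons_neg (fun hh => hc hh.1),
      ih t (fun m => hw (List.mem_cons_of_mem _ m)), List.cons_append]

theorem pvGlue {A B s : List Char} (hA : A <+: s) (hB : B <+: s.drop A.length) :
    (A ++ B) <+: s := by
  obtain ⟨r, rfl⟩ := hA
  rw [List.drop_left] at hB
  obtain ⟨r2, rfl⟩ := hB
  exact ⟨r2, by simp⟩

-- ---------- stemMatch through one replace pass ----------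
theorem pvStemMatch_repl (stem₀ : List Char) (a₀ : Char) :
    ∀ (ps : List (List Char × Char)) (cs : List Char),
      (∀ p ∈ ps, ' ' ∉ p.1) →
      (∀ p ∈ ps, p.1 <+: pvRepl stem₀ a₀ cs → p.1 <+: cs) →
      pvStemMatch ps (pvRepl stem₀ a₀ cs) =
        Option.map (fun q => (q.1, pvRepl stem₀ a₀ q.2)) (pvStemMatch ps cs) := by
  intro ps
  induction ps with
  | nil => intro cs _ _; simp [pvStemMatch]
  | cons p ps ih =>
    intro cs hsp hnc
    obtain ⟨t, b⟩ := p
    by_cases hp : t <+: cs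
    · obtain ⟨r, rfl⟩ := hp
      rw [pvRepl_skip stem₀ a₀ t r (hsp (t, b) List.mem_cons_self)]
      simp only [pvStemMatch, if_pos (List.prefix_append t (pvRepl stem₀ a₀ r)),
        if_pos (List.prefix_append t r), List.drop_left, Option.map_some]
    · have hp2 : ¬ t <+: pvRepl stem₀ a₀ cs := fun hh =>
        hp (hnc (t, b) List.mem_cons_self hh)
      simp only [pvStemMatch, if_neg hp, if_neg hp2]
      exact ih cs (fun p hp => hsp p (List.mem_cons_of_mem _ hp))
        (fun p hp => hnc p (List.mem_cons_of_mem _ hp))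

-- ---------- THE FUSION LEMMA ----------
theorem pvFuse (stem₀ : List Char) (a₀ : Char) (ps : List (List Char × Char))
    (hsp : ∀ p ∈ ps, ' ' ∉ p.1) (ha : a₀ ≠ ' ') :
    ∀ (n : Nat) (l : List Char), l.length ≤ n →
      (∀ s, (' ' :: s) <:+ l → ∀ p ∈ ps, p.1 <+: pvRepl stem₀ a₀ s → p.1 <+: s) →
      pvScanL ps (pvRepl stem₀ a₀ l) = pvScanL ((stem₀, a₀) :: ps) l := by
  intro n
  induction n with
  | zero =>
    intro l hl _
    have : l = [] := List.eq_nil_of_length_eq_zero (Nat.le_zero.mp hl)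
    subst this
    rw [pvRepl_nil, pvScanL_nil, pvScanL_nil]
  | succ n ih =>
    intro l hl hnc
    cases l with
    | nil => rw [pvRepl_nil, pvScanL_nil, pvScanL_nil]
    | cons c cs =>
      have hlcs : cs.length ≤ n := by simp at hl; omega
      by_cases hc : c = ' '
      · subst hc
        by_cases h0 : stem₀ <+: cs
        · rw [pvRepl_cons_pos ⟨rfl, h0⟩]
          rw [pvScanL_cons ha]
          rw [ih _ (by simp only [List.length_drop]; omega)
            (fun s hs p hp hpre => hnc s
              (hs.trans ((List.drop_suffix _ _).trans (List.suffix_cons _ _))) p hp hpre)]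
          rw [pvScanL_sp_some (ps := (stem₀, a₀) :: ps) (b := a₀)
            (rest := cs.drop stem₀.length) (by simp [pvStemMatch, h0])]
        · rw [pvRepl_cons_neg (fun hh => h0 hh.2)]
          have hsm := pvStemMatch_repl stem₀ a₀ ps cs hsp
            (fun p hp hpre => hnc cs (List.suffix_refl _) p hp hpre)
          cases hm : pvStemMatch ps cs with
          | none =>
            rw [pvScanL_sp_none (by rw [hsm, hm]; rfl)]
            rw [pvScanL_sp_none (ps := (stem₀, a₀) :: ps) (by simp [pvStemMatch, h0, hm])]
            rw [ih cs hlcs (fun s hs p hp hpre =>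
              hnc s (hs.trans (List.suffix_cons _ _)) p hp hpre)]
          | some q =>
            obtain ⟨b, rest⟩ := q
            have hrest : rest <:+ cs := pvStemMatch_suffix _ _ _ _ hm
            rw [pvScanL_sp_some (by rw [hsm, hm]; rfl)]
            rw [pvScanL_sp_some (ps := (stem₀, a₀) :: ps) (b := b) (rest := rest)
              (by simp [pvStemMatch, h0, hm])]
            rw [ih rest (le_trans hrest.length_le hlcs) (fun s hs p hp hpre =>
              hnc s (hs.trans (hrest.trans (List.suffix_cons _ _))) p hp hpre)]
      · rw [pvRepl_cons_neg (fun hh => hc hh.1)]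
        rw [pvScanL_cons hc, pvScanL_cons hc]
        rw [ih cs hlcs (fun s hs p hp hpre =>
          hnc s (hs.trans (List.suffix_cons _ _)) p hp hpre)]

-- ---------- what a prefix of pvRepl's output says about the input ----------
theorem pvCreate (stem : List Char) (a : Char) :
    ∀ (n : Nat) (l : List Char), l.length ≤ n → ∀ t : List Char, t <+: pvRepl stem a l →
      t <+: l ∨ ∃ m, m < t.length ∧ t[m]? = some a ∧
        (t.take m ++ ' ' :: stem) <+: l ∧
        (t.drop (m + 1)) <+: pvRepl stem a (l.drop (m + stem.length + 1)) := by
  intro n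
  induction n with
  | zero =>
    intro l hl t ht
    have : l = [] := List.eq_nil_of_length_eq_zero (Nat.le_zero.mp hl)
    subst this
    rw [pvRepl_nil] at ht
    exact Or.inl ht
  | succ n ih =>
    intro l hl t ht
    cases l with
    | nil =>
      rw [pvRepl_nil] at ht
      exact Or.inl ht
    | cons c cs =>
      have hlcs : cs.length ≤ n := by simp at hl; omega
      by_cases hcp : c = ' ' ∧ stem <+: cs
      · rw [pvRepl_cons_pos hcp] at ht
        cases t with
        | nil => exact Or.inl (List.nil_prefix)
        | cons x t' =>
          obtain ⟨hx, ht'⟩ := List.cons_prefix_cons.mp ht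
          right
          refine ⟨0, by simp, by simp [hx], ?_, ?_⟩
          · simpa using List.cons_prefix_cons.mpr ⟨hcp.1.symm, hcp.2⟩
          · simpa [List.drop_succ_cons] using ht'
      · rw [pvRepl_cons_neg hcp] at ht
        cases t with
        | nil => exact Or.inl (List.nil_prefix)
        | cons x t' =>
          obtain ⟨hx, ht'⟩ := List.cons_prefix_cons.mp ht
          rcases ih cs hlcs t' ht' with h | ⟨m, hm, hg, h1, h2⟩
          · exact Or.inl (List.cons_prefix_cons.mpr ⟨hx, h⟩)
          · right
            refine ⟨m + 1, by simpa using Nat.succ_lt_succ hm, by simpa using hg, ?_, ?_⟩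
            · rw [List.take_succ_cons, List.cons_append]
              exact List.cons_prefix_cons.mpr ⟨hx, h1⟩
            · simp only [List.drop_succ_cons]
              rw [show m + 1 + stem.length = m + stem.length + 1 from by omega]
              exact h2

theorem pvNoCreate (stem : List Char) (a : Char) {t : List Char} (hnt : a ∉ t)
    {l : List Char} (ht : t <+: pvRepl stem a l) : t <+: l := by
  rcases pvCreate stem a l.length l le_rfl t ht with h | ⟨m, _, hg, _, _⟩
  · exact h
  · exact absurd (List.mem_of_getElem? hg) hnt

theorem pvCreateAt (stem : List Char) (a : Char) (t : List Char) (M : Nat)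
    (huniq : ∀ m, m < t.length → t[m]? = some a → m = M)
    (htail : a ∉ t.drop (M + 1)) {s : List Char}
    (hpre : t <+: pvRepl stem a s) :
    t <+: s ∨ (t.take M ++ (' ' :: stem) ++ t.drop (M + 1)) <+: s := by
  rcases pvCreate stem a s.length s le_rfl t hpre with h | ⟨m, hm, hg, h1, h2⟩
  · exact Or.inl h
  · have hmM : m = M := huniq m hm hg
    subst hmM
    right
    have h3 : t.drop (m + 1) <+: s.drop (m + stem.length + 1) := pvNoCreate stem a htail h2
    have hlen : (t.take m ++ ' ' :: stem).length = m + stem.length + 1 := by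
      simp only [List.length_append, List.length_take, List.length_cons]
      omega
    have hB : t.drop (m + 1) <+: s.drop (t.take m ++ ' ' :: stem).length := by
      rw [hlen]; exact h3
    have := pvGlue (A := t.take m ++ ' ' :: stem) (B := t.drop (m + 1)) h1 hB
    simpa [List.append_assoc] using this

theorem pvTrigOfPre {Trig glued s lX : List Char} (hd : Trig <+: ' ' :: glued)
    (hres : glued <+: s) (hs : (' ' :: s) <:+ lX) : Trig <:+: lX :=
  ((hd.trans (List.cons_prefix_cons.mpr ⟨rfl, hres⟩)).isInfix).trans hs.isInfix

-- ---------- infix transfer through one replace pass ----------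
theorem pvInfixNoA (stem : List Char) (a : Char) {T : List Char} (hnt : a ∉ T) :
    ∀ (n : Nat) (l : List Char), l.length ≤ n → T <:+: pvRepl stem a l → T <:+: l := by
  intro n
  induction n with
  | zero =>
    intro l hl hT
    have : l = [] := List.eq_nil_of_length_eq_zero (Nat.le_zero.mp hl)
    subst this
    rwa [pvRepl_nil] at hT
  | succ n ih =>
    intro l hl hT
    cases l with
    | nil => rwa [pvRepl_nil] at hT
    | cons c cs =>
      have hlcs : cs.length ≤ n := by simp at hl; omega
      by_cases hcp : c = ' ' ∧ stem <+: cs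
      · rw [pvRepl_cons_pos hcp] at hT
        rcases List.infix_cons_iff.mp hT with hpre | hinf
        · cases T with
          | nil => simp
          | cons x T' =>
            obtain ⟨hx, _⟩ := List.cons_prefix_cons.mp hpre
            exact absurd (by simp [hx]) hnt
        · have := ih (cs.drop stem.length) (by simp only [List.length_drop]; omega) hinf
          exact List.infix_cons_iff.mpr (Or.inr (this.trans (List.drop_suffix _ _).isInfix))
      · rw [pvRepl_cons_neg hcp] at hT
        rcases List.infix_cons_iff.mp hT with hpre | hinf
        · cases T with
          | nil => simp
          | cons x T' =>
            obtain ⟨hx, hT'⟩ := List.cons_prefix_cons.mp hpre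
            have hnt' : a ∉ T' := fun hm => hnt (List.mem_cons_of_mem _ hm)
            exact (List.cons_prefix_cons.mpr ⟨hx, pvNoCreate stem a hnt' hT'⟩).isInfix
        · exact List.infix_cons_iff.mpr (Or.inr (ih cs hlcs hinf))

theorem pvPrefixCreate2 (stem : List Char) (a : Char) (T₂ : List Char) (h2 : a ∉ T₂) :
    ∀ (n : Nat) (T₁ l : List Char), a ∉ T₁ → l.length ≤ n →
      (T₁ ++ a :: T₂) <+: pvRepl stem a l →
      (T₁ ++ a :: T₂) <+: l ∨ (T₁ ++ ' ' :: stem ++ T₂) <+: l := by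
  intro n
  induction n with
  | zero =>
    intro T₁ l h1 hl hT
    have : l = [] := List.eq_nil_of_length_eq_zero (Nat.le_zero.mp hl)
    subst this
    rw [pvRepl_nil] at hT
    rw [List.prefix_nil] at hT
    simp at hT
  | succ n ih =>
    intro T₁ l h1 hl hT
    cases l with
    | nil =>
      rw [pvRepl_nil, List.prefix_nil] at hT
      simp at hT
    | cons c cs =>
      have hlcs : cs.length ≤ n := by simp at hl; omega
      by_cases hcp : c = ' ' ∧ stem <+: cs
      · rw [pvRepl_cons_pos hcp] at hT
        cases T₁ with
        | nil =>
          simp only [List.nil_append] at hT ⊢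
          obtain ⟨_, hT'⟩ := List.cons_prefix_cons.mp hT
          have h3 : T₂ <+: cs.drop stem.length := pvNoCreate stem a h2 hT'
          right
          exact List.cons_prefix_cons.mpr ⟨hcp.1.symm, pvGlue hcp.2 h3⟩
        | cons x T₁' =>
          obtain ⟨hx, _⟩ := List.cons_prefix_cons.mp hT
          exact absurd (by simp [hx]) h1
      · rw [pvRepl_cons_neg hcp] at hT
        cases T₁ with
        | nil =>
          simp only [List.nil_append] at hT ⊢
          obtain ⟨hx, hT'⟩ := List.cons_prefix_cons.mp hT
          left
          exact List.cons_prefix_cons.mpr ⟨hx, pvNoCreate stem a h2 hT'⟩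
        | cons x T₁' =>
          obtain ⟨hx, hT'⟩ := List.cons_prefix_cons.mp hT
          have h1' : a ∉ T₁' := fun hm => h1 (List.mem_cons_of_mem _ hm)
          rcases ih T₁' cs h1' hlcs (by simpa using hT') with h | h
          · exact Or.inl (List.cons_prefix_cons.mpr ⟨hx, h⟩)
          · exact Or.inr (List.cons_prefix_cons.mpr ⟨hx, by simpa using h⟩)

theorem pvInfixCreate2 (stem : List Char) (a : Char) (T₁ T₂ : List Char)
    (h1 : a ∉ T₁) (h2 : a ∉ T₂) :
    ∀ (n : Nat) (l : List Char), l.length ≤ n →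
      (T₁ ++ a :: T₂) <:+: pvRepl stem a l →
      (T₁ ++ a :: T₂) <:+: l ∨ (T₁ ++ ' ' :: stem ++ T₂) <:+: l := by
  intro n
  induction n with
  | zero =>
    intro l hl hT
    have : l = [] := List.eq_nil_of_length_eq_zero (Nat.le_zero.mp hl)
    subst this
    rw [pvRepl_nil] at hT
    rw [List.infix_nil] at hT
    simp at hT
  | succ n ih =>
    intro l hl hT
    cases l with
    | nil =>
      rw [pvRepl_nil, List.infix_nil] at hT
      simp at hT
    | cons c cs =>
      have hlcs : cs.length ≤ n := by simp at hl; omega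
      have hpfx : (T₁ ++ a :: T₂) <+: pvRepl stem a (c :: cs) →
          (T₁ ++ a :: T₂) <:+: (c :: cs) ∨ (T₁ ++ ' ' :: stem ++ T₂) <:+: (c :: cs) := by
        intro hp
        rcases pvPrefixCreate2 stem a T₂ h2 (c :: cs).length T₁ (c :: cs) h1 le_rfl hp with h | h
        · exact Or.inl h.isInfix
        · exact Or.inr h.isInfix
      by_cases hcp : c = ' ' ∧ stem <+: cs
      · rw [pvRepl_cons_pos hcp] at hT
        rcases List.infix_cons_iff.mp hT with hpre | hinf
        · exact hpfx (by rw [pvRepl_cons_pos hcp]; exact hpre)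
        · rcases ih (cs.drop stem.length) (by simp only [List.length_drop]; omega) hinf with h | h
          · exact Or.inl (List.infix_cons_iff.mpr
              (Or.inr (h.trans (List.drop_suffix _ _).isInfix)))
          · exact Or.inr (List.infix_cons_iff.mpr
              (Or.inr (h.trans (List.drop_suffix _ _).isInfix)))
      · rw [pvRepl_cons_neg hcp] at hT
        rcases List.infix_cons_iff.mp hT with hpre | hinf
        · exact hpfx (by rw [pvRepl_cons_neg hcp]; exact hpre)
        · rcases ih cs hlcs hinf with h | h
          · exact Or.inl (List.infix_cons_iff.mpr (Or.inr h))
          · exact Or.inr (List.infix_cons_iff.mpr (Or.inr h))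

-- ---------- port B computes pvScanL pvStems ----------
theorem pvUnitStep (u r : List Char) (ab : Char) :
    (match r with
      | 's' :: r' => some (ab, r')
      | r' => some (ab, r')) =
    (if (u ++ ['s']) <+: (u ++ r) then some (ab, (u ++ r).drop (u ++ ['s']).length)
     else some (ab, (u ++ r).drop u.length)) := by
  have hcan : ∀ x y : List Char, (u ++ x) <+: (u ++ y) ↔ x <+: y :=
    fun x y => List.prefix_append_right_inj u
  cases r with
  | nil =>
    rw [if_neg (by rw [hcan]; simp)]
    simp
  | cons c r' =>
    by_cases hc : c = 's'
    · subst hc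
      rw [if_pos (by rw [hcan]; exact ⟨r', rfl⟩)]
      have h5 : (u ++ 's' :: r') = (u ++ ['s']) ++ r' := by simp
      rw [h5, List.drop_left]
      rfl
    · rw [if_neg (by
        rw [hcan]
        intro hp
        exact hc (List.cons_prefix_cons.mp hp).1.symm)]
      rw [List.drop_left]
      split
      all_goals first
        | rfl
        | (rename_i r'' heq; injection heq with hh1 hh2; exact absurd hh1 hc)

theorem pvHeadStep (u : List Char) (ab : Char) (us : List (List Char × Char))
    (ps : List (List Char × Char)) (s : List Char)
    (hrec : ¬ u <+: s → pvTryUnit us s = pvStemMatch ps s) :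
    pvTryUnit ((u, ab) :: us) s = pvStemMatch ((u ++ ['s'], ab) :: (u, ab) :: ps) s := by
  by_cases h1 : u <+: s
  · obtain ⟨r, rfl⟩ := h1
    simp only [pvTryUnit, if_pos (List.prefix_append u r), List.drop_left]
    rw [pvUnitStep u r ab]
    simp only [pvStemMatch]
    rw [if_pos (List.prefix_append u r)]
  · have h2 : ¬ (u ++ ['s']) <+: s := fun hh => h1 ((List.prefix_append u ['s']).trans hh)
    simp only [pvTryUnit, pvStemMatch, if_neg h1, if_neg h2]
    exact hrec h1

theorem pvTryUnit_eq (s : List Char) : pvTryUnit pvUnits s = pvStemMatch pvStems s := by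
  have e1 : ("hours".toList : List Char) = "hour".toList ++ ['s'] := by decide
  have e2 : ("minutes".toList : List Char) = "minute".toList ++ ['s'] := by decide
  have e3 : ("seconds".toList : List Char) = "second".toList ++ ['s'] := by decide
  have e4 : ("days".toList : List Char) = "day".toList ++ ['s'] := by decide
  have e5 : ("weeks".toList : List Char) = "week".toList ++ ['s'] := by decide
  simp only [pvUnits, pvStems, e1, e2, e3, e4, e5]
  refine pvHeadStep _ _ _ _ _ (fun _ => ?_)
  refine pvHeadStep _ _ _ _ _ (fun _ => ?_)
  refine pvHeadStep _ _ _ _ _ (fun _ => ?_)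
  refine pvHeadStep _ _ _ _ _ (fun _ => ?_)
  refine pvHeadStep _ _ _ _ _ (fun _ => ?_)
  rfl

theorem pvScanGo_eq : ∀ (fuel : Nat) (l : List Char), l.length ≤ fuel →
    pvScanGo fuel l = pvScanL pvStems l := by
  intro fuel
  induction fuel with
  | zero =>
    intro l hl
    have : l = [] := List.eq_nil_of_length_eq_zero (Nat.le_zero.mp hl)
    subst this
    rw [pvScanL_nil]
    rfl
  | succ fuel ih =>
    intro l hl
    cases l with
    | nil => rw [pvScanL_nil]; rfl
    | cons c cs =>
      have hlcs : cs.length ≤ fuel := by simp at hl; omega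
      by_cases hc : c = ' '
      · subst hc
        rw [show pvScanGo (fuel + 1) (' ' :: cs)
              = (match pvTryUnit pvUnits cs with
                  | some (ab, rest) => ab :: pvScanGo fuel rest
                  | none => ' ' :: pvScanGo fuel cs) from by simp [pvScanGo]]
        rw [pvTryUnit_eq]
        cases hm : pvStemMatch pvStems cs with
        | some q =>
          obtain ⟨b, rest⟩ := q
          have hrest := pvStemMatch_suffix _ _ _ _ hm
          rw [pvScanL_sp_some hm]
          show b :: pvScanGo fuel rest = b :: pvScanL pvStems rest
          rw [ih rest (le_trans hrest.length_le hlcs)]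
        | none =>
          rw [pvScanL_sp_none hm]
          show ' ' :: pvScanGo fuel cs = ' ' :: pvScanL pvStems cs
          rw [ih cs hlcs]
      · rw [show pvScanGo (fuel + 1) (c :: cs) = c :: pvScanGo fuel cs from by
          simp [pvScanGo, hc]]
        rw [pvScanL_cons hc, ih cs hlcs]

-- ---------- the main equivalence on char lists ----------
theorem pvMain (l : List Char) (hc : ∀ T ∈ pvTriggers, ¬ T <:+: l) :
    pvPasses l = pvScanL pvStems l := by
  obtain ⟨l1, hl1⟩ : ∃ x, pvRepl "hours".toList 'h' l = x := ⟨_, rfl⟩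
  obtain ⟨l2, hl2⟩ : ∃ x, pvRepl "hour".toList 'h' l1 = x := ⟨_, rfl⟩
  obtain ⟨l3, hl3⟩ : ∃ x, pvRepl "minutes".toList 'm' l2 = x := ⟨_, rfl⟩
  obtain ⟨l4, hl4⟩ : ∃ x, pvRepl "minute".toList 'm' l3 = x := ⟨_, rfl⟩
  obtain ⟨l5, hl5⟩ : ∃ x, pvRepl "seconds".toList 's' l4 = x := ⟨_, rfl⟩
  obtain ⟨l6, hl6⟩ : ∃ x, pvRepl "second".toList 's' l5 = x := ⟨_, rfl⟩
  obtain ⟨l7, hl7⟩ : ∃ x, pvRepl "days".toList 'd' l6 = x := ⟨_, rfl⟩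
  obtain ⟨l8, hl8⟩ : ∃ x, pvRepl "day".toList 'd' l7 = x := ⟨_, rfl⟩
  obtain ⟨l9, hl9⟩ : ∃ x, pvRepl "weeks".toList 'w' l8 = x := ⟨_, rfl⟩
  obtain ⟨l10, hl10⟩ : ∃ x, pvRepl "week".toList 'w' l9 = x := ⟨_, rfl⟩
  have hpasses : pvPasses l = l10 := by
    simp only [pvPasses, pvStems, List.foldl]
    rw [hl1, hl2, hl3, hl4, hl5, hl6, hl7, hl8, hl9, hl10]
  -- absence of the trigger substrings at the stages where it is needed
  have tA0 : ¬ "  hoursour".toList <:+: l := hc _ (by simp [pvTriggers])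
  have tB0 : ¬ "  minutesinute".toList <:+: l := hc _ (by simp [pvTriggers])
  have tC0 : ¬ "  secondsecond".toList <:+: l := hc _ (by simp [pvTriggers])
  have tD0 : ¬ "  daysay".toList <:+: l := hc _ (by simp [pvTriggers])
  have tE0 : ¬ "  weekseek".toList <:+: l := hc _ (by simp [pvTriggers])
  have tF0 : ¬ " day second".toList <:+: l := hc _ (by simp [pvTriggers])
  have tG0 : ¬ " week second".toList <:+: l := hc _ (by simp [pvTriggers])
  have trans1 : ∀ T : List Char, 'h' ∉ T → ¬ T <:+: l → ¬ T <:+: l1 := by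
    intro T hT h0 hI; rw [← hl1] at hI
    exact h0 (pvInfixNoA _ 'h' hT _ _ le_rfl hI)
  have trans2 : ∀ T : List Char, 'h' ∉ T → ¬ T <:+: l1 → ¬ T <:+: l2 := by
    intro T hT h0 hI; rw [← hl2] at hI
    exact h0 (pvInfixNoA _ 'h' hT _ _ le_rfl hI)
  have trans3 : ∀ T : List Char, 'm' ∉ T → ¬ T <:+: l2 → ¬ T <:+: l3 := by
    intro T hT h0 hI; rw [← hl3] at hI
    exact h0 (pvInfixNoA _ 'm' hT _ _ le_rfl hI)
  have trans4 : ∀ T : List Char, 'm' ∉ T → ¬ T <:+: l3 → ¬ T <:+: l4 := by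
    intro T hT h0 hI; rw [← hl4] at hI
    exact h0 (pvInfixNoA _ 'm' hT _ _ le_rfl hI)
  have trans7 : ∀ T : List Char, 'd' ∉ T → ¬ T <:+: l6 → ¬ T <:+: l7 := by
    intro T hT h0 hI; rw [← hl7] at hI
    exact h0 (pvInfixNoA _ 'd' hT _ _ le_rfl hI)
  have trans8 : ∀ T : List Char, 'd' ∉ T → ¬ T <:+: l7 → ¬ T <:+: l8 := by
    intro T hT h0 hI; rw [← hl8] at hI
    exact h0 (pvInfixNoA _ 'd' hT _ _ le_rfl hI)
  have tB2 : ¬ "  minutesinute".toList <:+: l2 :=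
    trans2 _ (by decide) (trans1 _ (by decide) tB0)
  have tC4 : ¬ "  secondsecond".toList <:+: l4 :=
    trans4 _ (by decide) (trans3 _ (by decide) (trans2 _ (by decide) (trans1 _ (by decide) tC0)))
  have tD4 : ¬ "  daysay".toList <:+: l4 :=
    trans4 _ (by decide) (trans3 _ (by decide) (trans2 _ (by decide) (trans1 _ (by decide) tD0)))
  have tE4 : ¬ "  weekseek".toList <:+: l4 :=
    trans4 _ (by decide) (trans3 _ (by decide) (trans2 _ (by decide) (trans1 _ (by decide) tE0)))
  have tF4 : ¬ " day second".toList <:+: l4 :=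
    trans4 _ (by decide) (trans3 _ (by decide) (trans2 _ (by decide) (trans1 _ (by decide) tF0)))
  have tG4 : ¬ " week second".toList <:+: l4 :=
    trans4 _ (by decide) (trans3 _ (by decide) (trans2 _ (by decide) (trans1 _ (by decide) tG0)))
  have tF5 : ¬ " day second".toList <:+: l5 := by
    intro hI; rw [← hl5] at hI
    have hdec : (" day second".toList : List Char) = " day ".toList ++ 's' :: "econd".toList := by decide
    rw [hdec] at hI
    rcases pvInfixCreate2 "seconds".toList 's' " day ".toList "econd".toList
      (by decide) (by decide) l4.length l4 le_rfl hI with h | h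
    · exact tF4 (by rw [hdec]; exact h)
    · exact tC4 ((by decide : ("  secondsecond".toList : List Char) <:+:
        (" day ".toList ++ ' ' :: "seconds".toList ++ "econd".toList)).trans h)
  have tG5 : ¬ " week second".toList <:+: l5 := by
    intro hI; rw [← hl5] at hI
    have hdec : (" week second".toList : List Char) = " week ".toList ++ 's' :: "econd".toList := by decide
    rw [hdec] at hI
    rcases pvInfixCreate2 "seconds".toList 's' " week ".toList "econd".toList
      (by decide) (by decide) l4.length l4 le_rfl hI with h | h
    · exact tG4 (by rw [hdec]; exact h)
    · exact tC4 ((by decide : ("  secondsecond".toList : List Char) <:+: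
        (" week ".toList ++ ' ' :: "seconds".toList ++ "econd".toList)).trans h)
  have tD5 : ¬ "  daysay".toList <:+: l5 := by
    intro hI; rw [← hl5] at hI
    have hdec : ("  daysay".toList : List Char) = "  day".toList ++ 's' :: "ay".toList := by decide
    rw [hdec] at hI
    rcases pvInfixCreate2 "seconds".toList 's' "  day".toList "ay".toList
      (by decide) (by decide) l4.length l4 le_rfl hI with h | h
    · exact tD4 (by rw [hdec]; exact h)
    · exact tF4 ((by decide : (" day second".toList : List Char) <:+:
        ("  day".toList ++ ' ' :: "seconds".toList ++ "ay".toList)).trans h)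
  have tD6 : ¬ "  daysay".toList <:+: l6 := by
    intro hI; rw [← hl6] at hI
    have hdec : ("  daysay".toList : List Char) = "  day".toList ++ 's' :: "ay".toList := by decide
    rw [hdec] at hI
    rcases pvInfixCreate2 "second".toList 's' "  day".toList "ay".toList
      (by decide) (by decide) l5.length l5 le_rfl hI with h | h
    · exact tD5 (by rw [hdec]; exact h)
    · exact tF5 ((by decide : (" day second".toList : List Char) <:+:
        ("  day".toList ++ ' ' :: "second".toList ++ "ay".toList)).trans h)
  have tE5 : ¬ "  weekseek".toList <:+: l5 := by
    intro hI; rw [← hl5] at hI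
    have hdec : ("  weekseek".toList : List Char) = "  week".toList ++ 's' :: "eek".toList := by decide
    rw [hdec] at hI
    rcases pvInfixCreate2 "seconds".toList 's' "  week".toList "eek".toList
      (by decide) (by decide) l4.length l4 le_rfl hI with h | h
    · exact tE4 (by rw [hdec]; exact h)
    · exact tG4 ((by decide : (" week second".toList : List Char) <:+:
        ("  week".toList ++ ' ' :: "seconds".toList ++ "eek".toList)).trans h)
  have tE6 : ¬ "  weekseek".toList <:+: l6 := by
    intro hI; rw [← hl6] at hI
    have hdec : ("  weekseek".toList : List Char) = "  week".toList ++ 's' :: "eek".toList := by decide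
    rw [hdec] at hI
    rcases pvInfixCreate2 "second".toList 's' "  week".toList "eek".toList
      (by decide) (by decide) l5.length l5 le_rfl hI with h | h
    · exact tE5 (by rw [hdec]; exact h)
    · exact tG5 ((by decide : (" week second".toList : List Char) <:+:
        ("  week".toList ++ ' ' :: "second".toList ++ "eek".toList)).trans h)
  have tE8 : ¬ "  weekseek".toList <:+: l8 :=
    trans8 _ (by decide) (trans7 _ (by decide) tE6)
  -- the ten fusion steps
  have f10 : pvScanL [] l10 = pvScanL [("week".toList, 'w')] l9 := by
    rw [← hl10]
    exact pvFuse "week".toList 'w' [] (by simp) (by decide) l9.length l9 le_rfl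
      (by intro s _ p hp; simp at hp)
  have f9 : pvScanL [("week".toList, 'w')] l9
      = pvScanL [("weeks".toList, 'w'), ("week".toList, 'w')] l8 := by
    rw [← hl9]
    refine pvFuse "weeks".toList 'w' _ (by decide) (by decide) l8.length l8 le_rfl ?_
    intro s hs p hp hpre
    fin_cases hp
    rcases pvCreateAt "weeks".toList 'w' "week".toList 0 (by decide) (by decide) hpre with h | h
    · exact h
    · exact absurd (pvTrigOfPre (by decide) h hs) tE8
  have f8 : pvScanL [("weeks".toList, 'w'), ("week".toList, 'w')] l8
      = pvScanL [("day".toList, 'd'), ("weeks".toList, 'w'), ("week".toList, 'w')] l7 := by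
    rw [← hl8]
    refine pvFuse "day".toList 'd' _ (by decide) (by decide) l7.length l7 le_rfl ?_
    intro s hs p hp hpre
    fin_cases hp <;> exact pvNoCreate _ _ (by decide) hpre
  have f7 : pvScanL [("day".toList, 'd'), ("weeks".toList, 'w'), ("week".toList, 'w')] l7
      = pvScanL [("days".toList, 'd'), ("day".toList, 'd'), ("weeks".toList, 'w'),
          ("week".toList, 'w')] l6 := by
    rw [← hl7]
    refine pvFuse "days".toList 'd' _ (by decide) (by decide) l6.length l6 le_rfl ?_
    intro s hs p hp hpre
    fin_cases hp
    · rcases pvCreateAt "days".toList 'd' "day".toList 0 (by decide) (by decide) hpre with h | h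
      · exact h
      · exact absurd (pvTrigOfPre (by decide) h hs) tD6
    · exact pvNoCreate _ _ (by decide) hpre
    · exact pvNoCreate _ _ (by decide) hpre
  have f6 : pvScanL [("days".toList, 'd'), ("day".toList, 'd'), ("weeks".toList, 'w'),
        ("week".toList, 'w')] l6
      = pvScanL [("second".toList, 's'), ("days".toList, 'd'), ("day".toList, 'd'),
          ("weeks".toList, 'w'), ("week".toList, 'w')] l5 := by
    rw [← hl6]
    refine pvFuse "second".toList 's' _ (by decide) (by decide) l5.length l5 le_rfl ?_
    intro s hs p hp hpre
    fin_cases hp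
    · rcases pvCreateAt "second".toList 's' "days".toList 3 (by decide) (by decide) hpre with h | h
      · exact h
      · exact absurd (pvTrigOfPre (by decide) h hs) tF5
    · exact pvNoCreate _ _ (by decide) hpre
    · rcases pvCreateAt "second".toList 's' "weeks".toList 4 (by decide) (by decide) hpre with h | h
      · exact h
      · exact absurd (pvTrigOfPre (by decide) h hs) tG5
    · exact pvNoCreate _ _ (by decide) hpre
  have f5 : pvScanL [("second".toList, 's'), ("days".toList, 'd'), ("day".toList, 'd'),
        ("weeks".toList, 'w'), ("week".toList, 'w')] l5
      = pvScanL [("seconds".toList, 's'), ("second".toList, 's'), ("days".toList, 'd'),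
          ("day".toList, 'd'), ("weeks".toList, 'w'), ("week".toList, 'w')] l4 := by
    rw [← hl5]
    refine pvFuse "seconds".toList 's' _ (by decide) (by decide) l4.length l4 le_rfl ?_
    intro s hs p hp hpre
    fin_cases hp
    · rcases pvCreateAt "seconds".toList 's' "second".toList 0 (by decide) (by decide) hpre with h | h
      · exact h
      · exact absurd (pvTrigOfPre (by decide) h hs) tC4
    · rcases pvCreateAt "seconds".toList 's' "days".toList 3 (by decide) (by decide) hpre with h | h
      · exact h
      · exact absurd (pvTrigOfPre (by decide) h hs) tF4
    · exact pvNoCreate _ _ (by decide) hpre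
    · rcases pvCreateAt "seconds".toList 's' "weeks".toList 4 (by decide) (by decide) hpre with h | h
      · exact h
      · exact absurd (pvTrigOfPre (by decide) h hs) tG4
    · exact pvNoCreate _ _ (by decide) hpre
  have f4 : pvScanL [("seconds".toList, 's'), ("second".toList, 's'), ("days".toList, 'd'),
        ("day".toList, 'd'), ("weeks".toList, 'w'), ("week".toList, 'w')] l4
      = pvScanL [("minute".toList, 'm'), ("seconds".toList, 's'), ("second".toList, 's'),
          ("days".toList, 'd'), ("day".toList, 'd'), ("weeks".toList, 'w'),
          ("week".toList, 'w')] l3 := by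
    rw [← hl4]
    refine pvFuse "minute".toList 'm' _ (by decide) (by decide) l3.length l3 le_rfl ?_
    intro s hs p hp hpre
    fin_cases hp <;> exact pvNoCreate _ _ (by decide) hpre
  have f3 : pvScanL [("minute".toList, 'm'), ("seconds".toList, 's'), ("second".toList, 's'),
        ("days".toList, 'd'), ("day".toList, 'd'), ("weeks".toList, 'w'),
        ("week".toList, 'w')] l3
      = pvScanL [("minutes".toList, 'm'), ("minute".toList, 'm'), ("seconds".toList, 's'),
          ("second".toList, 's'), ("days".toList, 'd'), ("day".toList, 'd'),
          ("weeks".toList, 'w'), ("week".toList, 'w')] l2 := by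
    rw [← hl3]
    refine pvFuse "minutes".toList 'm' _ (by decide) (by decide) l2.length l2 le_rfl ?_
    intro s hs p hp hpre
    fin_cases hp
    · rcases pvCreateAt "minutes".toList 'm' "minute".toList 0 (by decide) (by decide) hpre with h | h
      · exact h
      · exact absurd (pvTrigOfPre (by decide) h hs) tB2
    all_goals exact pvNoCreate _ _ (by decide) hpre
  have f2 : pvScanL [("minutes".toList, 'm'), ("minute".toList, 'm'), ("seconds".toList, 's'),
        ("second".toList, 's'), ("days".toList, 'd'), ("day".toList, 'd'),
        ("weeks".toList, 'w'), ("week".toList, 'w')] l2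
      = pvScanL [("hour".toList, 'h'), ("minutes".toList, 'm'), ("minute".toList, 'm'),
          ("seconds".toList, 's'), ("second".toList, 's'), ("days".toList, 'd'),
          ("day".toList, 'd'), ("weeks".toList, 'w'), ("week".toList, 'w')] l1 := by
    rw [← hl2]
    refine pvFuse "hour".toList 'h' _ (by decide) (by decide) l1.length l1 le_rfl ?_
    intro s hs p hp hpre
    fin_cases hp <;> exact pvNoCreate _ _ (by decide) hpre
  have f1 : pvScanL [("hour".toList, 'h'), ("minutes".toList, 'm'), ("minute".toList, 'm'),
        ("seconds".toList, 's'), ("second".toList, 's'), ("days".toList, 'd'),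
        ("day".toList, 'd'), ("weeks".toList, 'w'), ("week".toList, 'w')] l1
      = pvScanL pvStems l := by
    rw [← hl1]
    refine pvFuse "hours".toList 'h' _ (by decide) (by decide) l.length l le_rfl ?_
    intro s hs p hp hpre
    fin_cases hp
    · rcases pvCreateAt "hours".toList 'h' "hour".toList 0 (by decide) (by decide) hpre with h | h
      · exact h
      · exact absurd (pvTrigOfPre (by decide) h hs) tA0
    all_goals exact pvNoCreate _ _ (by decide) hpre
  rw [hpasses, ← pvScanL_empty l10, f10, f9, f8, f7, f6, f5, f4, f3, f2, f1]

-- ===== VERDICT (by name: the statement is the Claim_ definition above) =====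
set_option maxHeartbeats 1000000 in
theorem shorten_docker_status_py_spec : Claim_equal_shorten_docker_status_py := by
  intro status _ hpre
  unfold Pre_shorten_docker_status_py at hpre
  have hn : ∀ t : String, t ∈ ["  hoursour", "  minutesinute", "  secondsecond",
      "  daysay", "  weekseek", " day second", " week second"] →
      ¬ t.toList <:+: status.toList := by
    intro t ht hinf
    exact hpre ⟨t, ht, hinf⟩
  have hc : ∀ T ∈ pvTriggers, ¬ T <:+: status.toList := by
    intro T hT
    simp only [pvTriggers, List.mem_cons, List.not_mem_nil, or_false] at hT
    rcases hT with rfl | rfl | rfl | rfl | rfl | rfl | rfl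
    exacts [hn _ (by simp), hn _ (by simp), hn _ (by simp), hn _ (by simp),
      hn _ (by simp), hn _ (by simp), hn _ (by simp)]
  show shorten_docker_status_py status = shorten_docker_status_py_alt status
  apply String.toList_inj.mp
  rw [pvA_toList, pvMain _ hc]
  show pvScanL pvStems status.toList = (shorten_docker_status_py_alt status).toList
  rw [shorten_docker_status_py_alt, String.toList_ofList, pvScan]
  exact (pvScanGo_eq _ _ le_rfl).symm
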